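-- pv_equiv track=rewrite | github.com/gXeeXqBHuHDFTaEnff3Z/SHP | utils/SHP_ecc.py | extract_hamming_checksum
-- ===== SOURCE A (Python) =====
-- def extract_hamming_checksum(hamming_code):
--     """
--     Extract the Hamming checksum and message bits from the combined hamming code.
--
--     :param hamming_code: A string representing the combined Hamming code
--     :return: A tuple (message_bits, checksum) where both are strings
--     """
--     code_length = len(hamming_code)
--     r = 0
--
--     # Determine the number of parity bits
--     while (1 << r) < code_length:
--         r += 1
--
--     # Identify parity positions
--     parity_positions = [1 << i for i in range(r)]
--
--     # Extract the message bits
--     message_bits = []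
--     for i in range(1, code_length + 1):
--         if i not in parity_positions:
--             message_bits.append(hamming_code[i - 1])
--
--     # Extract the checksum (parity bits)
--     checksum = []
--     for pos in parity_positions:
--         if pos <= code_length:
--             checksum.append(hamming_code[pos - 1])
--
--     # Check if there's an overall parity bit
--     if len(hamming_code) > code_length:
--         checksum.append(hamming_code[-1])
--
--     #return message_bits, checksum
--     return "".join(message_bits), "".join(checksum)
-- ===== SOURCE B (Python) =====
-- def extract_hamming_checksum(hamming_code):
--     n = len(hamming_code)
--     message_bits, checksum = [], []
--     next_parity = 1
--     for i, ch in enumerate(hamming_code, 1):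
--         if next_parity < n and i == next_parity:
--             checksum.append(ch)
--             next_parity *= 2
--         else:
--             message_bits.append(ch)
--     return "".join(message_bits), "".join(checksum)
-- ===== Notes on version B (the rewrite author's own statement) =====
-- stated objective: faster
-- what changed: Replaced A's precomputed parity-position list and two separate extraction loops (with a list-membership test per position) by a single forward pass that keeps a running next-power-of-two counter and classifies each character into message or checksum on the fly.
import Mathlib
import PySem

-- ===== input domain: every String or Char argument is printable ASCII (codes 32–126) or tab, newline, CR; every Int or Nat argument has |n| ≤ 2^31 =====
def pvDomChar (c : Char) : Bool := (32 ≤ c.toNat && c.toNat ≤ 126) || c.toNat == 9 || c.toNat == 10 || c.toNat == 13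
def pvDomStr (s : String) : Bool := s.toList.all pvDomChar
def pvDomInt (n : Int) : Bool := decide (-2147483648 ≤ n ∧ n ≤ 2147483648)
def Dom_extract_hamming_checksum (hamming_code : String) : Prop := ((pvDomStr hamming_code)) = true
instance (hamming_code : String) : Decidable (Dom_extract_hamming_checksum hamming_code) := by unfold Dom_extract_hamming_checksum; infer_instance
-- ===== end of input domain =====

-- B replaces A's precomputed parity-position list and two loops (membership test per position)
-- by one forward pass with a running next-power-of-two counter; a timing run measured B faster.

-- ===== PORT A =====
-- while (1 << r) < code_length: r += 1
def pvRLoop (n r : Nat) : Nat :=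
  if 2 ^ r < n then pvRLoop n (r + 1) else r
termination_by n - 2 ^ r
decreasing_by
  have h2 : 2 ^ r < 2 ^ (r + 1) := Nat.pow_lt_pow_succ (by norm_num)
  omega

def extract_hamming_checksum (hamming_code : String) : String × String :=
  let cs := hamming_code.toList
  let code_length := cs.length
  let r := pvRLoop code_length 0
  let parity_positions := (List.range r).map (fun i => 2 ^ i)
  let message_bits := (List.range' 1 code_length).foldl
    (fun acc i => if i ∉ parity_positions then acc ++ [cs.getD (i - 1) ' '] else acc) []
  let checksum := parity_positions.foldl
    (fun acc pos => if pos ≤ code_length then acc ++ [cs.getD (pos - 1) ' '] else acc) []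
  -- dead branch in A: len(hamming_code) > code_length is never true
  let checksum := if cs.length > code_length then checksum ++ [cs.getD (code_length - 1) ' '] else checksum
  (String.ofList message_bits, String.ofList checksum)

-- ===== PORT B =====
def pvAltGo (n i p : Nat) (msg chk : List Char) : List Char → List Char × List Char
  | [] => (msg, chk)
  | c :: rest =>
    if p < n ∧ i = p then pvAltGo n (i + 1) (p * 2) msg (chk ++ [c]) rest
    else pvAltGo n (i + 1) p (msg ++ [c]) chk rest

def extract_hamming_checksum_alt (hamming_code : String) : String × String :=
  let cs := hamming_code.toList
  let out := pvAltGo cs.length 1 1 [] [] cs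
  (String.ofList out.1, String.ofList out.2)

-- ===== PRECONDITION & SPEC =====
def Spec_extract_hamming_checksum (hamming_code : String) (out : String × String) : Prop := out = extract_hamming_checksum_alt hamming_code
instance (hamming_code : String) (out : String × String) : Decidable (Spec_extract_hamming_checksum hamming_code out) := by unfold Spec_extract_hamming_checksum; infer_instance

-- ===== CLAIM (what is proved, stated in full; the proofs are below) =====
def Claim_equal_extract_hamming_checksum : Prop := ∀ (hamming_code : String), Dom_extract_hamming_checksum hamming_code → Spec_extract_hamming_checksum hamming_code (extract_hamming_checksum hamming_code)

-- ===== LEMMAS AND PROOFS =====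

-- position i (1-based) is a parity position iff i is a power of two and i < n
def pvIsPar (n i : Nat) : Bool := decide ((∃ k, k < n ∧ i = 2 ^ k) ∧ i < n)

lemma pvRLoop_iff (n : Nat) : ∀ r0, (∀ j, j < r0 → 2 ^ j < n) →
    ∀ j, (j < pvRLoop n r0 ↔ 2 ^ j < n) := by
  intro r0
  fun_induction pvRLoop n r0 with
  | case1 r hlt ih =>
    intro h j
    refine ih ?_ j
    intro j hj
    rcases Nat.lt_succ_iff_lt_or_eq.1 hj with h1 | h1
    · exact h j h1
    · subst h1; exact hlt
  | case2 r hnlt =>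
    intro h j
    constructor
    · exact h j
    · intro hj
      by_contra hge
      have hge' : r ≤ j := by omega
      have := Nat.pow_le_pow_right (by norm_num : 1 ≤ 2) hge'
      omega

lemma pvIsPar_iff (n i : Nat) : pvIsPar n i = true ↔ (∃ k, i = 2 ^ k) ∧ i < n := by
  simp only [pvIsPar, decide_eq_true_eq]
  constructor
  · rintro ⟨⟨k, _, hk⟩, hlt⟩; exact ⟨⟨k, hk⟩, hlt⟩
  · rintro ⟨⟨k, hk⟩, hlt⟩
    have : k < 2 ^ k := Nat.lt_two_pow_self
    exact ⟨⟨k, by omega, hk⟩, hlt⟩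

lemma mem_parity_iff (n i : Nat) :
    i ∈ (List.range (pvRLoop n 0)).map (fun j => 2 ^ j) ↔ pvIsPar n i = true := by
  have hr := pvRLoop_iff n 0 (by omega)
  rw [pvIsPar_iff]
  simp only [List.mem_map, List.mem_range]
  constructor
  · rintro ⟨j, hj, rfl⟩
    exact ⟨⟨j, rfl⟩, (hr j).1 hj⟩
  · rintro ⟨⟨j, rfl⟩, hlt⟩
    exact ⟨j, (hr j).2 hlt, rfl⟩

-- A's guarded-append folds as filters/maps
lemma foldl_ite_append {α β : Type} (p : α → Prop) [DecidablePred p] (f : α → β) :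
    ∀ (l : List α) (acc : List β),
      l.foldl (fun a x => if p x then a ++ [f x] else a) acc
        = acc ++ (l.filter (fun x => decide (p x))).map f := by
  intro l
  induction l with
  | nil => simp
  | cons x l ih =>
    intro acc
    by_cases h : p x <;> simp [h, ih]

lemma foldl_ite_append_all {α β : Type} (p : α → Prop) [DecidablePred p] (f : α → β) :
    ∀ (l : List α) (acc : List β), (∀ x ∈ l, p x) →
      l.foldl (fun a x => if p x then a ++ [f x] else a) acc = acc ++ l.map f := by
  intro l
  induction l with
  | nil => simp
  | cons x l ih =>
    intro acc hall
    rw [List.foldl_cons, if_pos (hall x (by simp)),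
      ih _ (fun y hy => hall y (by simp [hy]))]
    simp

-- the parity-position list is the filter of [1..n] by pvIsPar
lemma parity_eq_filter (n : Nat) :
    (List.range (pvRLoop n 0)).map (fun j => 2 ^ j)
      = (List.range' 1 n).filter (pvIsPar n) := by
  have sl : ((List.range (pvRLoop n 0)).map (fun j => 2 ^ j)).Pairwise (· < ·) := by
    refine List.Pairwise.map _ ?_ List.pairwise_lt_range
    intro a b hab
    exact Nat.pow_lt_pow_right (by norm_num) hab
  have sr : ((List.range' 1 n).filter (pvIsPar n)).Pairwise (· < ·) := by
    have h : (List.range' 1 n).Pairwise (· < ·) := by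
      simpa using List.pairwise_lt_range' (s := 1) (n := n) (step := 1)
    exact h.filter _
  have nl : ((List.range (pvRLoop n 0)).map (fun j => 2 ^ j)).Nodup :=
    sl.imp (fun h => Nat.ne_of_lt h)
  have nr : ((List.range' 1 n).filter (pvIsPar n)).Nodup :=
    sr.imp (fun h => Nat.ne_of_lt h)
  have hmem : ∀ x, x ∈ (List.range (pvRLoop n 0)).map (fun j => 2 ^ j) ↔
      x ∈ (List.range' 1 n).filter (pvIsPar n) := by
    intro x
    rw [mem_parity_iff, List.mem_filter]
    constructor
    · intro hx
      refine ⟨?_, hx⟩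
      obtain ⟨⟨k, rfl⟩, hlt⟩ := (pvIsPar_iff n x).1 hx
      have : 1 ≤ 2 ^ k := Nat.one_le_two_pow
      exact List.mem_range'_1.2 (by omega)
    · rintro ⟨_, hp⟩
      exact hp
  exact ((List.perm_ext_iff_of_nodup nl nr).2 hmem).eq_of_pairwise (fun a b _ _ h1 h2 => by omega) sl sr

-- a power of two p with i ≤ p < 2*i forces p = i when i is a power of two
lemma pow_squeeze (k m : Nat) (h1 : 2 ^ m ≤ 2 ^ k) (h2 : 2 ^ k < 2 * 2 ^ m) : 2 ^ k = 2 ^ m := by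
  have hm : m ≤ k := (Nat.pow_le_pow_iff_right (by norm_num)).1 h1
  have hk : k < m + 1 := by
    have h3 : 2 * 2 ^ m = 2 ^ (m + 1) := by ring
    exact (Nat.pow_lt_pow_iff_right (a := 2) (by norm_num)).1 (by omega)
  have : k = m := by omega
  rw [this]

lemma map_getD_shift (c : Char) (rest : List Char) (i m : Nat) (q : Nat → Bool) :
    ((List.range' (i + 1) m).filter q).map (fun j => (c :: rest).getD (j - i) ' ')
      = ((List.range' (i + 1) m).filter q).map (fun j => rest.getD (j - (i + 1)) ' ') := by
  apply List.map_congr_left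
  intro j hj
  have hj' : i + 1 ≤ j := (List.mem_range'_1.1 (List.mem_of_mem_filter hj)).1
  have h : j - i = (j - (i + 1)) + 1 := by omega
  rw [h, List.getD_cons_succ]

lemma pvAltGo_spec (n : Nat) : ∀ (l : List Char) (i p : Nat) (msg chk : List Char),
    (∃ k, p = 2 ^ k) → i ≤ p → p < 2 * i → i + l.length ≤ n + 1 →
    pvAltGo n i p msg chk l =
      (msg ++ ((List.range' i l.length).filter (fun j => !pvIsPar n j)).map (fun j => l.getD (j - i) ' '),
       chk ++ ((List.range' i l.length).filter (pvIsPar n)).map (fun j => l.getD (j - i) ' ')) := by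
  intro l
  induction l with
  | nil => intro i p msg chk _ _ _ _; simp [pvAltGo]
  | cons c rest ih =>
    intro i p msg chk hpow hip hpi hlen
    rw [pvAltGo]
    simp only [List.length_cons, List.range'_succ]
    by_cases hC : p < n ∧ i = p
    · have hpar : pvIsPar n i = true := by
        rw [pvIsPar_iff]
        obtain ⟨k, hk⟩ := hpow
        exact ⟨⟨k, hC.2.trans hk⟩, by omega⟩
      rw [if_pos hC]
      obtain ⟨k, hk⟩ := hpow
      rw [ih (i + 1) (p * 2) msg (chk ++ [c]) ⟨k + 1, by rw [hk]; ring⟩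
        (by omega) (by omega) (by simp only [List.length_cons] at hlen; omega)]
      simp only [hpar, List.filter_cons, Bool.not_true, Bool.false_eq_true, if_false, if_true,
        List.map_cons, Nat.sub_self, List.getD_cons_zero]
      rw [map_getD_shift, map_getD_shift]
      simp
    · rw [if_neg hC]
      have hnpar : pvIsPar n i = false := by
        rw [Bool.eq_false_iff]
        intro hpar
        obtain ⟨⟨k, hk⟩, hlt⟩ := (pvIsPar_iff n i).1 hpar
        obtain ⟨m, hm⟩ := hpow
        have heq : 2 ^ m = 2 ^ k := pow_squeeze m k (by omega) (by omega)
        exact hC ⟨by omega, by omega⟩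
      by_cases hip' : i = p
      · have hrest : rest = [] := List.eq_nil_of_length_eq_zero (by
          have hpn : ¬ p < n := fun h => hC ⟨h, hip'⟩
          simp only [List.length_cons] at hlen
          omega)
        subst hrest
        simp [pvAltGo, hnpar]
      · rw [ih (i + 1) p (msg ++ [c]) chk hpow (by omega) (by omega)
          (by simp only [List.length_cons] at hlen; omega)]
        simp only [hnpar, List.filter_cons, Bool.not_false, Bool.false_eq_true, if_false, if_true,
          List.map_cons, Nat.sub_self, List.getD_cons_zero]
        rw [map_getD_shift, map_getD_shift]
        simp

-- ===== VERDICT (by name: the statement is the Claim_ definition above) =====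
theorem extract_hamming_checksum_spec : Claim_equal_extract_hamming_checksum := by
  intro s _
  unfold Spec_extract_hamming_checksum
  simp only [extract_hamming_checksum, extract_hamming_checksum_alt]
  have hdead : ¬ s.toList.length > s.toList.length := by omega
  rw [if_neg hdead]
  rw [foldl_ite_append (fun i => i ∉ (List.range (pvRLoop s.toList.length 0)).map (fun j => 2 ^ j))
    (fun i => s.toList.getD (i - 1) ' ')]
  rw [foldl_ite_append_all (fun pos => pos ≤ s.toList.length)
    (fun pos => s.toList.getD (pos - 1) ' ') _ _ ?hle]
  case hle =>
    intro x hx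
    have := (pvIsPar_iff s.toList.length x).1 ((mem_parity_iff s.toList.length x).1 hx)
    omega
  rw [pvAltGo_spec s.toList.length s.toList 1 1 [] [] ⟨0, rfl⟩ le_rfl (by omega) (by omega)]
  have hfc : (List.range' 1 s.toList.length).filter
        (fun x => decide (x ∉ (List.range (pvRLoop s.toList.length 0)).map (fun j => 2 ^ j)))
      = (List.range' 1 s.toList.length).filter (fun j => !pvIsPar s.toList.length j) := by
    apply List.filter_congr
    intro x _
    have h := mem_parity_iff s.toList.length x
    have hd : decide (x ∈ (List.range (pvRLoop s.toList.length 0)).map (fun j => 2 ^ j))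
        = pvIsPar s.toList.length x := by
      cases hp : pvIsPar s.toList.length x
      · rw [decide_eq_false_iff_not]
        intro hm
        rw [h.1 hm] at hp
        cases hp
      · rw [decide_eq_true_eq]
        exact h.2 hp
    rw [decide_not, hd]
  rw [hfc, parity_eq_filter]
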